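-- pv_equiv track=rewrite | github.com/karthikeyan200417/Recomendation | RECOMENDATION/recomendation.py | get_similar_destinations
-- ===== SOURCE A (Python) =====
-- def get_similar_destinations(input_destination):
--     recommendations = {
--         1: ["Charminar", "Golconda Fort", "Chowmahalla Palace", "Qutb Shahi Tombs"],
--         2: ["Salar Jung Museum", "Birla Planetarium", "Laad Bazaar"],
--         3: ["Hussain Sagar Lake", "Necklace Road", "Hyderabad Botanical Garden"],
--     }
--     input_destination = input_destination.lower()
--
--     # Flatten the recommendations into a dictionary
--     destination_to_category = {destination.lower(): category for category, destinations in recommendations.items() for destination in destinations}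
--
--     if input_destination in destination_to_category:
--         category = destination_to_category[input_destination]
--         similar_destinations = recommendations[category]
--         similar_destinations = [d for d in similar_destinations if d.lower() != input_destination]
--         return similar_destinations
--     else:
--         return None
-- ===== SOURCE B (Python) =====
-- def get_similar_destinations(input_destination):
--     recommendations = {
--         1: ["Charminar", "Golconda Fort", "Chowmahalla Palace", "Qutb Shahi Tombs"],
--         2: ["Salar Jung Museum", "Birla Planetarium", "Laad Bazaar"],
--         3: ["Hussain Sagar Lake", "Necklace Road", "Hyderabad Botanical Garden"],
--     }
--     inp = input_destination.lower()
--     # Scan the category lists directly: no flattened index dict.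
--     for destinations in recommendations.values():
--         if inp in (d.lower() for d in destinations):
--             return [d for d in destinations if d.lower() != inp]
--     return None
-- ===== Notes on version B (the rewrite author's own statement) =====
-- stated objective: simpler
-- what changed: Dropped the flattened destination-to-category index dict; B lowercases the input once and scans the category lists directly, returning the first category containing the name (filtered) or None.
import Mathlib
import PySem

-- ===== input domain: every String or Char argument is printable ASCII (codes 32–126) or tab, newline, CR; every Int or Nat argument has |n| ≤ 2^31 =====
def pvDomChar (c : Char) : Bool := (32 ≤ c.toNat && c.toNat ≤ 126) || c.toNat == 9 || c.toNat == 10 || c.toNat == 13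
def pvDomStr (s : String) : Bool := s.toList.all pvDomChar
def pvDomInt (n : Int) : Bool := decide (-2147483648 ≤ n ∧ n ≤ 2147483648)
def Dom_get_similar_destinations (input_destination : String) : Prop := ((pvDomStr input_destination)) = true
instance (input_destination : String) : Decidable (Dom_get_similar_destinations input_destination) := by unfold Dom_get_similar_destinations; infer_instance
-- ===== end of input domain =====

-- B drops A's flattened destination→category index dict and scans the category lists directly (simpler; return value only).

-- ===== PORT A =====
def get_similar_destinations (input_destination : String) : Option (List String) :=
  let recommendations : PySem.Dict Int (List String) :=
    PySem.Dict.ofList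
      [(1, ["Charminar", "Golconda Fort", "Chowmahalla Palace", "Qutb Shahi Tombs"]),
       (2, ["Salar Jung Museum", "Birla Planetarium", "Laad Bazaar"]),
       (3, ["Hussain Sagar Lake", "Necklace Road", "Hyderabad Botanical Garden"])]
  let inp := PySem.Str.lower input_destination
  -- dict comprehension flattening the recommendations
  let destination_to_category : PySem.Dict String Int :=
    recommendations.items.foldl
      (fun acc p => p.2.foldl (fun acc d => acc.insert (PySem.Str.lower d) p.1) acc)
      PySem.Dict.empty
  if destination_to_category.contains inp then
    match destination_to_category.get? inp with
    | some category =>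
      match recommendations.get? category with
      | some similar_destinations =>
          some (similar_destinations.filter (fun d => !(PySem.Str.lower d == inp)))
      | none => none   -- unreachable (KeyError in Python)
    | none => none     -- unreachable (guarded by `contains`)
  else
    none

-- ===== PORT B =====
-- for-loop over recommendations.values(): first category whose lowered names contain inp
def altScan (inp : String) : List (List String) → Option (List String)
  | [] => none
  | destinations :: rest =>
    if inp ∈ destinations.map PySem.Str.lower then
      some (destinations.filter (fun d => !(PySem.Str.lower d == inp)))
    else altScan inp rest

def get_similar_destinations_alt (input_destination : String) : Option (List String) :=
  altScan (PySem.Str.lower input_destination)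
    [["Charminar", "Golconda Fort", "Chowmahalla Palace", "Qutb Shahi Tombs"],
     ["Salar Jung Museum", "Birla Planetarium", "Laad Bazaar"],
     ["Hussain Sagar Lake", "Necklace Road", "Hyderabad Botanical Garden"]]

-- ===== PRECONDITION & SPEC =====
def Spec_get_similar_destinations (input_destination : String) (out : Option (List String)) : Prop := out = get_similar_destinations_alt input_destination
instance (input_destination : String) (out : Option (List String)) : Decidable (Spec_get_similar_destinations input_destination out) := by unfold Spec_get_similar_destinations; infer_instance

-- ===== CLAIM (what is proved, stated in full; the proofs are below) =====
def Claim_equal_get_similar_destinations : Prop := ∀ (input_destination : String), Dom_get_similar_destinations input_destination → Spec_get_similar_destinations input_destination (get_similar_destinations input_destination)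

-- ===== LEMMAS AND PROOFS =====
set_option maxRecDepth 8192 in
theorem key_lemma (s : String) :
    (let recommendations : PySem.Dict Int (List String) :=
      PySem.Dict.ofList
        [(1, ["Charminar", "Golconda Fort", "Chowmahalla Palace", "Qutb Shahi Tombs"]),
         (2, ["Salar Jung Museum", "Birla Planetarium", "Laad Bazaar"]),
         (3, ["Hussain Sagar Lake", "Necklace Road", "Hyderabad Botanical Garden"])]
     let destination_to_category : PySem.Dict String Int :=
      recommendations.items.foldl
        (fun acc p => p.2.foldl (fun acc d => acc.insert (PySem.Str.lower d) p.1) acc)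
        PySem.Dict.empty
     if destination_to_category.contains s then
       match destination_to_category.get? s with
       | some category =>
         match recommendations.get? category with
         | some similar_destinations =>
             some (similar_destinations.filter (fun d => !(PySem.Str.lower d == s)))
         | none => none
       | none => none
     else none) =
    altScan s
      [["Charminar", "Golconda Fort", "Chowmahalla Palace", "Qutb Shahi Tombs"],
       ["Salar Jung Museum", "Birla Planetarium", "Laad Bazaar"],
       ["Hussain Sagar Lake", "Necklace Road", "Hyderabad Botanical Garden"]] := by
  by_cases h1 : s = "charminar"; · subst h1; decide
  by_cases h2 : s = "golconda fort"; · subst h2; decide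
  by_cases h3 : s = "chowmahalla palace"; · subst h3; decide
  by_cases h4 : s = "qutb shahi tombs"; · subst h4; decide
  by_cases h5 : s = "salar jung museum"; · subst h5; decide
  by_cases h6 : s = "birla planetarium"; · subst h6; decide
  by_cases h7 : s = "laad bazaar"; · subst h7; decide
  by_cases h8 : s = "hussain sagar lake"; · subst h8; decide
  by_cases h9 : s = "necklace road"; · subst h9; decide
  by_cases h10 : s = "hyderabad botanical garden"; · subst h10; decide
  have hd : (List.foldl (fun acc p => List.foldl (fun acc d => acc.insert (PySem.Str.lower d) p.1) acc p.2)
      (PySem.Dict.empty : PySem.Dict String Int)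
      (PySem.Dict.ofList
          [((1:Int), ["Charminar", "Golconda Fort", "Chowmahalla Palace", "Qutb Shahi Tombs"]),
            (2, ["Salar Jung Museum", "Birla Planetarium", "Laad Bazaar"]),
            (3, ["Hussain Sagar Lake", "Necklace Road", "Hyderabad Botanical Garden"])]).items) =
      PySem.Dict.mk [("charminar", 1), ("golconda fort", 1), ("chowmahalla palace", 1),
        ("qutb shahi tombs", 1), ("salar jung museum", 2), ("birla planetarium", 2),
        ("laad bazaar", 2), ("hussain sagar lake", 3), ("necklace road", 3),
        ("hyderabad botanical garden", 3)] := by decide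
  simp only [hd]
  simp [altScan, PySem.Dict.contains_mk,
        show PySem.Str.lower "Charminar" = "charminar" from by decide,
        show PySem.Str.lower "Golconda Fort" = "golconda fort" from by decide,
        show PySem.Str.lower "Chowmahalla Palace" = "chowmahalla palace" from by decide,
        show PySem.Str.lower "Qutb Shahi Tombs" = "qutb shahi tombs" from by decide,
        show PySem.Str.lower "Salar Jung Museum" = "salar jung museum" from by decide,
        show PySem.Str.lower "Birla Planetarium" = "birla planetarium" from by decide,
        show PySem.Str.lower "Laad Bazaar" = "laad bazaar" from by decide,
        show PySem.Str.lower "Hussain Sagar Lake" = "hussain sagar lake" from by decide,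
        show PySem.Str.lower "Necklace Road" = "necklace road" from by decide,
        show PySem.Str.lower "Hyderabad Botanical Garden" = "hyderabad botanical garden" from by decide,
        h1, h2, h3, h4, h5, h6, h7, h8, h9, h10,
        Ne.symm h1, Ne.symm h2, Ne.symm h3, Ne.symm h4, Ne.symm h5,
        Ne.symm h6, Ne.symm h7, Ne.symm h8, Ne.symm h9, Ne.symm h10]

-- ===== VERDICT (by name: the statement is the Claim_ definition above) =====
theorem get_similar_destinations_spec : Claim_equal_get_similar_destinations := by
  intro s _
  unfold Spec_get_similar_destinations get_similar_destinations get_similar_destinations_alt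
  exact key_lemma (PySem.Str.lower s)
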